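-- pv_equiv track=rewrite | github.com/Fidget278/2022-Algorithm-Study | 개인문제/편근형/숫자게임.py | solution
-- ===== SOURCE A (Python) =====
-- def solution(A, B):
--     if min(A) > max(B):
--         return 0
--     A.sort(reverse = True)
--     B.sort(reverse = True)
--     answer = 0
--     for a in A:
--         if a >= B[0]:
--             continue
--         else:
--             answer += 1
--             del B[0]
--     return answer
-- ===== SOURCE B (Python) =====
-- def solution(A, B):
--     A.sort(reverse=True)
--     B.sort(reverse=True)
--     count = 0
--     for a in A:
--         if count < len(B) and a < B[count]:
--             count += 1
--     return count
-- ===== Notes on version B (the rewrite author's own statement) =====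
-- stated objective: faster
-- what changed: B drops the min/max early-exit and replaces A's repeated del B[0] (an O(n) list shift per match) by an index pointer that walks once over the sorted lists.
import Mathlib
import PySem

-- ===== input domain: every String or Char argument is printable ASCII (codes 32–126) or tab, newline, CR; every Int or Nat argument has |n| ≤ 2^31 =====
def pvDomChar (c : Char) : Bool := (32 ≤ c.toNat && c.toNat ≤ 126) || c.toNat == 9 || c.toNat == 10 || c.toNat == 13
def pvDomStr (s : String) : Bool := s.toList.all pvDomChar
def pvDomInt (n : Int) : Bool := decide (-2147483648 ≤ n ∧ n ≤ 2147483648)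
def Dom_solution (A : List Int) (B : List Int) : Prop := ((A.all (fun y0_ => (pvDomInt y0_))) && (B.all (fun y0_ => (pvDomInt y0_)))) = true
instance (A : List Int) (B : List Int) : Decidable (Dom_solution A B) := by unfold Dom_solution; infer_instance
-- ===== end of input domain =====

-- B replaces A's repeated `del B[0]` (O(n) per match) by an index pointer into sorted B;
-- equivalence is about the RETURN value only (both sort their arguments in place; A skips
-- the sorts when min(A) > max(B)).

-- ===== PORT A =====
-- loop 'for a in A: if a >= B[0]: continue else: answer += 1; del B[0]'
-- B[0] is pyGet? Bs 0 (none = IndexError, excluded by Pre_; the 0 returned there is arbitrary);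
-- 'del B[0]' on a nonempty list is exactly List.tail.
def solDelLoop : List Int → List Int → Int → Int
  | [], _, ans => ans
  | a :: rest, Bs, ans =>
    match PySem.List.pyGet? Bs 0 with
    | none => 0  -- IndexError in Python; unreachable under Pre_solution
    | some b0 =>
      if b0 ≤ a then solDelLoop rest Bs ans
      else solDelLoop rest Bs.tail (ans + 1)

def solution (A : List Int) (B : List Int) : Int :=
  match PySem.List.min? A (fun x => x), PySem.List.max? B (fun x => x) with
  | some mA, some mB =>
    if mB < mA then 0
    else
      solDelLoop (PySem.List.sorted A (fun x => x) true)
                 (PySem.List.sorted B (fun x => x) true) 0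
  | _, _ => 0  -- min()/max() of an empty list raises ValueError; unreachable under Pre_solution

-- ===== PORT B =====
-- 'for a in A: if count < len(B) and a < B[count]: count += 1'
def bFold (Bs : List Int) (as : List Int) (cnt : Int) : Int :=
  as.foldl
    (fun cnt a =>
      if cnt < (Bs.length : Int) ∧ a < PySem.List.pyGetD Bs cnt 0 then cnt + 1 else cnt)
    cnt

def solution_alt (A : List Int) (B : List Int) : Int :=
  bFold (PySem.List.sorted B (fun x => x) true)
        (PySem.List.sorted A (fun x => x) true) 0

-- ===== PRECONDITION & SPEC =====
-- Pre_ excludes exactly the inputs on which A raises: empty A or empty B (min()/max() raise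
-- ValueError), and the inputs on which the loop exhausts B so that 'B[0]' raises IndexError —
-- which happens precisely when len(B) < len(A) and, with both lists sorted descending, each of
-- the last len(B) elements of A-without-its-minimum is below the corresponding element of B.
def Pre_solution (A : List Int) (B : List Int) : Prop :=
  A ≠ [] ∧ B ≠ [] ∧
  ¬ (B.length < A.length ∧
     ∀ t < B.length,
       (PySem.List.sorted A (fun x => x) true).getD (A.length - 1 - B.length + t) 0 <
       (PySem.List.sorted B (fun x => x) true).getD t 0)
instance (A : List Int) (B : List Int) : Decidable (Pre_solution A B) := by
  unfold Pre_solution; infer_instance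

def pvWitness_solution : List Int × List Int := ([3, 1], [2, 4])

def Spec_solution (A : List Int) (B : List Int) (out : Int) : Prop := out = solution_alt A B
instance (A : List Int) (B : List Int) (out : Int) : Decidable (Spec_solution A B out) := by
  unfold Spec_solution; infer_instance

-- ===== CLAIM (what is proved, stated in full; the proofs are below) =====
def Claim_equal_solution : Prop :=
  ∀ (A : List Int) (B : List Int), Dom_solution A B → Pre_solution A B →
    Spec_solution A B (solution A B)

-- ===== LEMMAS AND PROOFS =====

-- Nat mirror of bFold's counter, used to state and prove the safety facts.
def gcount (Bs : List Int) : List Int → Nat → Nat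
  | [], j => j
  | a :: rest, j =>
    if j < Bs.length ∧ a < Bs.getD j 0 then gcount Bs rest (j + 1) else gcount Bs rest j

lemma gcount_le (Bs : List Int) : ∀ (as : List Int) (j : Nat),
    j ≤ gcount Bs as j ∧ gcount Bs as j ≤ j + as.length := by
  intro as
  induction as with
  | nil => intro j; simp [gcount]
  | cons a rest ih =>
    intro j
    simp only [gcount]
    split_ifs with h
    · have := ih (j + 1); constructor <;> simp at * <;> omega
    · have := ih j; constructor <;> simp at * <;> omega

lemma gcount_le_len (Bs : List Int) : ∀ (as : List Int) (j : Nat),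
    j ≤ Bs.length → gcount Bs as j ≤ Bs.length := by
  intro as
  induction as with
  | nil => intro j h; simpa [gcount] using h
  | cons a rest ih =>
    intro j h
    simp only [gcount]
    split_ifs with hc
    · exact ih (j + 1) hc.1
    · exact ih j h

-- any element of a descending (Pairwise ≥) cons list is ≤ its head
lemma desc_getD_le_head (a : Int) (rest : List Int)
    (hd : (a :: rest).Pairwise (fun x y => y ≤ x)) (k : Nat) (hk : k < rest.length + 1) :
    (a :: rest).getD k 0 ≤ a := by
  cases k with
  | zero => simp
  | succ k' =>
    have hk' : k' < rest.length := by omega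
    rw [show (a :: rest).getD (k' + 1) 0 = rest.getD k' 0 by simp [List.getD]]
    rw [List.getD_eq_getElem rest 0 hk']
    exact (List.pairwise_cons.mp hd).1 _ (List.getElem_mem hk')

-- If the greedy counter reaches c over a descending list, then each matched b beats the
-- corresponding tail element of the list (the matching can be pushed to the smallest elements).
lemma gcount_matched (Bs : List Int) : ∀ (as : List Int),
    as.Pairwise (fun x y => y ≤ x) → ∀ (j t : Nat), j ≤ t → t < gcount Bs as j →
      as.getD (as.length - (gcount Bs as j - j) + (t - j)) 0 < Bs.getD t 0 := by
  intro as
  induction as with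
  | nil => intro _ j t hjt ht; simp [gcount] at ht; omega
  | cons a rest ih =>
    intro hp j t hjt ht
    have hp' : rest.Pairwise (fun x y => y ≤ x) := (List.pairwise_cons.mp hp).2
    simp only [gcount] at ht ⊢
    split_ifs at ht ⊢ with h
    · -- increment case
      set c := gcount Bs rest (j + 1) with hc
      have hb1 : j + 1 ≤ c := (gcount_le Bs rest (j + 1)).1
      have hb2 : c ≤ j + 1 + rest.length := (gcount_le Bs rest (j + 1)).2
      by_cases hT : t = j
      · -- matched with b_j : list element at index L - (c - j) ≤ a < Bs[j]
        calc (a :: rest).getD ((a :: rest).length - (c - j) + (t - j)) 0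
            ≤ a := desc_getD_le_head a rest hp _ (by simp only [List.length_cons]; omega)
          _ < Bs.getD j 0 := h.2
          _ = Bs.getD t 0 := by rw [hT]
      · have hjt' : j + 1 ≤ t := by omega
        have := ih hp' (j + 1) t hjt' ht
        -- rewrite the cons index to the tail index
        have harith : (a :: rest).length - (c - j) + (t - j)
            = (rest.length - (c - (j + 1)) + (t - (j + 1))) + 1 := by
          simp; omega
        rw [harith, show (a :: rest).getD (rest.length - (c - (j+1)) + (t - (j+1)) + 1) 0
              = rest.getD (rest.length - (c - (j+1)) + (t - (j+1))) 0 by simp [List.getD]]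
        exact this
    · -- no increment
      set c := gcount Bs rest j with hc
      have hb1 : j ≤ c := (gcount_le Bs rest j).1
      have hb2 : c ≤ j + rest.length := (gcount_le Bs rest j).2
      have := ih hp' j t hjt ht
      have harith : (a :: rest).length - (c - j) + (t - j)
          = (rest.length - (c - j) + (t - j)) + 1 := by
        simp; omega
      rw [harith, show (a :: rest).getD (rest.length - (c - j) + (t - j) + 1) 0
            = rest.getD (rest.length - (c - j) + (t - j)) 0 by simp [List.getD]]
      exact this

-- The two loops agree as long as the counter stays below |Bs| before each step.
lemma loop_eq (Bs : List Int) : ∀ (as : List Int) (j : Nat),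
    (∀ i < as.length, gcount Bs (as.take i) j < Bs.length) →
    solDelLoop as (Bs.drop j) (j : Int) = bFold Bs as (j : Int) := by
  intro as
  induction as with
  | nil => intro j _; simp [solDelLoop, bFold]
  | cons a rest ih =>
    intro j hsafe
    have hj : j < Bs.length := by
      have := hsafe 0 (by simp)
      simpa [gcount] using this
    have hdrop : Bs.drop j = Bs[j] :: Bs.drop (j + 1) := List.drop_eq_getElem_cons hj
    have hget : PySem.List.pyGet? (Bs.drop j) 0 = some Bs[j] := by
      rw [hdrop]; simp [PySem.List.pyGet?, PySem.List.pyIdx?, hj]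
    have hgetD : PySem.List.pyGetD Bs (j : Int) 0 = Bs[j] := by
      rw [PySem.List.pyGetD_natCast, List.getD_eq_getElem Bs 0 hj]
    have hgetD' : Bs.getD j 0 = Bs[j] := List.getD_eq_getElem Bs 0 hj
    by_cases hcmp : a < Bs[j]
    · have hstep : solDelLoop (a :: rest) (Bs.drop j) (j : Int)
          = solDelLoop rest (Bs.drop (j + 1)) ((j : Int) + 1) := by
        simp only [solDelLoop, hget]
        rw [if_neg (not_le.mpr hcmp), List.tail_drop]
      have hbstep : bFold Bs (a :: rest) (j : Int) = bFold Bs rest ((j : Int) + 1) := by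
        simp only [bFold, List.foldl_cons]
        rw [if_pos ⟨by exact_mod_cast hj, by rw [hgetD]; exact hcmp⟩]
      rw [hstep, hbstep, show ((j : Int) + 1) = ((j + 1 : Nat) : Int) by push_cast; ring]
      apply ih
      intro i hi
      have := hsafe (i + 1) (by simpa using Nat.succ_lt_succ hi)
      simpa [gcount, hj, hgetD', hcmp] using this
    · have hstep : solDelLoop (a :: rest) (Bs.drop j) (j : Int)
          = solDelLoop rest (Bs.drop j) (j : Int) := by
        simp only [solDelLoop, hget]
        rw [if_pos (not_lt.mp hcmp)]
      have hbstep : bFold Bs (a :: rest) (j : Int) = bFold Bs rest (j : Int) := by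
        simp only [bFold, List.foldl_cons]
        rw [if_neg (by rw [hgetD]; exact fun h => hcmp h.2)]
      rw [hstep, hbstep]
      apply ih
      intro i hi
      have := hsafe (i + 1) (by simpa using Nat.succ_lt_succ hi)
      have hnc : ¬ (j < Bs.length ∧ a < Bs.getD j 0) := by
        rw [hgetD']; exact fun h => hcmp h.2
      rw [List.take_succ_cons] at this
      simp only [gcount] at this
      rwa [if_neg hnc] at this

-- When every element of A beats every element of Bs, B's fold never increments.
lemma bFold_zero (Bs : List Int) (as : List Int)
    (h : ∀ a ∈ as, ∀ b ∈ Bs, ¬ a < b) : bFold Bs as 0 = 0 := by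
  induction as with
  | nil => rfl
  | cons a rest ih =>
    simp only [bFold, List.foldl_cons]
    rw [if_neg]
    · exact ih fun x hx => h x (List.mem_cons_of_mem _ hx)
    · rintro ⟨hlen, hlt⟩
      have hBs : Bs ≠ [] := by
        intro hnil; rw [hnil] at hlen; simp at hlen
      have hmem : PySem.List.pyGetD Bs 0 0 ∈ Bs := by
        rw [PySem.List.pyGetD_zero, List.getD_eq_getElem Bs 0 (by
          cases Bs with | nil => exact absurd rfl hBs | cons x t => simp)]
        exact List.getElem_mem _
      exact h a (List.mem_cons_self) _ hmem hlt

-- ===== VERDICT (by name: the statement is the Claim_ definition above) =====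
theorem solution_spec : Claim_equal_solution := by
  intro A B _ hpre
  obtain ⟨hA, hB, hbound⟩ := hpre
  unfold Spec_solution
  obtain ⟨mA, hmA⟩ : ∃ m, PySem.List.min? A (fun x => x) = some m := by
    cases h : PySem.List.min? A (fun x => x) with
    | none => exact absurd ((PySem.List.min?_eq_none_iff A (fun x => x)).mp h) hA
    | some m => exact ⟨m, rfl⟩
  obtain ⟨mB, hmB⟩ : ∃ m, PySem.List.max? B (fun x => x) = some m := by
    cases h : PySem.List.max? B (fun x => x) with
    | none => exact absurd ((PySem.List.max?_eq_none_iff B (fun x => x)).mp h) hB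
    | some m => exact ⟨m, rfl⟩
  simp only [solution, hmA, hmB]
  set As := PySem.List.sorted A (fun x => x) true with hAs
  set Bs := PySem.List.sorted B (fun x => x) true with hBs
  have hpermA : As.Perm A := PySem.List.sorted_perm A _ _
  have hpermB : Bs.Perm B := PySem.List.sorted_perm B _ _
  by_cases hcmp : mB < mA
  · rw [if_pos hcmp]
    unfold solution_alt
    rw [← hAs, ← hBs]
    refine (bFold_zero Bs As fun a ha b hb => ?_).symm
    have h1 : mA ≤ a := PySem.List.min?_isMin hmA a (hpermA.mem_iff.mp ha)
    have h2 : b ≤ mB := PySem.List.max?_isMax hmB b (hpermB.mem_iff.mp hb)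
    omega
  · rw [if_neg hcmp]
    unfold solution_alt
    rw [← hAs, ← hBs]
    have hdesc : As.Pairwise (fun x y => y ≤ x) := by
      have := PySem.List.sorted_pairwise_rev (xs := A) (key := fun x => x)
      simpa [← hAs] using this
    have hlenA : As.length = A.length := hpermA.length_eq
    have hlenB : Bs.length = B.length := hpermB.length_eq
    have hmpos : 1 ≤ Bs.length := by
      cases hbn : Bs with
      | nil => exact absurd (List.Perm.nil_eq (hbn ▸ hpermB)).symm hB
      | cons x t => simp
    have hsafe : ∀ i < As.length, gcount Bs (As.take i) 0 < Bs.length := by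
      by_contra hneg
      push Not at hneg
      obtain ⟨i, hi, hge⟩ := hneg
      have hle : gcount Bs (As.take i) 0 ≤ Bs.length := gcount_le_len Bs _ 0 (Nat.zero_le _)
      have heq : gcount Bs (As.take i) 0 = Bs.length := le_antisymm hle hge
      have hlt : (As.take i).length = i := by
        rw [List.length_take]; omega
      have hmlei : Bs.length ≤ i := by
        have h2 := (gcount_le Bs (As.take i) 0).2
        rw [heq, hlt] at h2; omega
      apply hbound
      refine ⟨by omega, ?_⟩
      intro t ht
      rw [← hlenB] at ht
      have hpair : (As.take i).Pairwise (fun x y => y ≤ x) :=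
        hdesc.sublist (List.take_sublist i As)
      have hm := gcount_matched Bs (As.take i) hpair 0 t (Nat.zero_le _) (by omega)
      rw [heq, hlt] at hm
      simp only [Nat.sub_zero] at hm
      -- translate the take-index to an As-index
      have hidx1 : i - Bs.length + t < i := by omega
      have hidx1' : i - Bs.length + t < As.length := by omega
      have htake : (As.take i).getD (i - Bs.length + t) 0 = As.getD (i - Bs.length + t) 0 := by
        rw [List.getD_eq_getElem _ 0 (by rw [hlt]; exact hidx1),
            List.getD_eq_getElem _ 0 hidx1']
        simp [List.getElem_take]
      rw [htake] at hm
      -- descending: the later (smaller) element at n-1-m+t is ≤ the one at i-m+t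
      have hidx2 : As.length - 1 - Bs.length + t < As.length := by omega
      have hmono : As.getD (As.length - 1 - Bs.length + t) 0 ≤ As.getD (i - Bs.length + t) 0 := by
        rw [List.getD_eq_getElem _ 0 hidx2, List.getD_eq_getElem _ 0 hidx1']
        rcases Nat.lt_or_ge (i - Bs.length + t) (As.length - 1 - Bs.length + t) with hlt' | hge'
        · exact (List.pairwise_iff_getElem.mp hdesc) _ _ hidx1' hidx2 hlt'
        · have : i - Bs.length + t = As.length - 1 - Bs.length + t := by omega
          simp [this]
      rw [← hlenA, ← hlenB]
      exact lt_of_le_of_lt hmono hm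
    have := loop_eq Bs As 0 hsafe
    simpa using this
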